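-- pv_equiv track=rewrite | github.com/spaceOfSoul/perfect-rail | Project31/Songs/looong.py | remove_sections_and_first_line
-- ===== SOURCE A (Python) =====
-- def remove_sections_and_first_line(content):
--     content = content[1:]
--
--     sections_to_remove = ["[General]", "[Editor]", "[Metadata]", "[Difficulty]", "[Events]"]
--
--     filtered_content = []
--     skip_section = False
--     for line in content:
--         if any(line.strip() == section for section in sections_to_remove):
--             skip_section = True
--         elif line.strip().startswith('[') and skip_section:
--             skip_section = False
--
--         if not skip_section:
--             filtered_content.append(line)
--
--     return filtered_content
-- ===== SOURCE B (Python) =====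
-- def remove_sections_and_first_line(content):
--     remove = {"[General]", "[Editor]", "[Metadata]", "[Difficulty]", "[Events]"}
--     # Partition content[1:] into segments, starting a new segment at each
--     # line whose strip() starts with '['; the first (headerless) segment is
--     # always kept, a headed segment is kept iff its header is not in `remove`.
--     segments = [[]]
--     for line in content[1:]:
--         if line.strip().startswith('['):
--             segments.append([])
--         segments[-1].append(line)
--     out = list(segments[0])
--     for seg in segments[1:]:
--         if seg[0].strip() not in remove:
--             out.extend(seg)
--     return out
-- ===== Notes on version B (the rewrite author's own statement) =====
-- stated objective: alternative
-- what changed: Replaces A's stateful skip-flag toggle with a two-phase decomposition: partition the tail into header-delimited segments, then keep the leading segment plus every segment whose header is not one of the five removal strings.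
import Mathlib
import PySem

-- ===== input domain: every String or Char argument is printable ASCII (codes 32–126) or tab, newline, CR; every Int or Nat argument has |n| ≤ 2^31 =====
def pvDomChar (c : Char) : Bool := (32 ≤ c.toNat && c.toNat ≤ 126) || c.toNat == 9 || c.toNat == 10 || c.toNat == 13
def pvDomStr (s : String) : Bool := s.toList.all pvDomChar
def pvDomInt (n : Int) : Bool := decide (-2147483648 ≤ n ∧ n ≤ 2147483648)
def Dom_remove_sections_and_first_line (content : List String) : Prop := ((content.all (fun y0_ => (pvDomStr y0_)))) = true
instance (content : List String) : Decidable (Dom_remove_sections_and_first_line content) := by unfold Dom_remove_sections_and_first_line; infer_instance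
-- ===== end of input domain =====

-- B replaces A's stateful skip-flag toggle by a two-phase decomposition (partition into
-- header-delimited segments, then filter whole segments); same return value, similar cost.

-- ===== PORT A =====
def pvSectionsToRemove : List String :=
  ["[General]", "[Editor]", "[Metadata]", "[Difficulty]", "[Events]"]

-- one iteration of A's for-loop over state (skip_section, filtered_content)
def pvStepA (s : Bool × List String) (line : String) : Bool × List String :=
  let skip :=
    if pvSectionsToRemove.any (fun sec => PySem.Str.strip line == sec) then true
    else if PySem.Str.startswith (PySem.Str.strip line) "[" && s.1 then false
    else s.1
  (skip, if skip then s.2 else s.2 ++ [line])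

def remove_sections_and_first_line (content : List String) : List String :=
  -- content = content[1:]  (slice from 1 = drop 1)
  ((content.drop 1).foldl pvStepA (false, [])).2

-- ===== PORT B =====
-- seg[0].strip() not in remove  (seg is always nonempty; headI is seg[0])
def pvKeepSeg (seg : List String) : Bool :=
  !(pvSectionsToRemove.any (fun sec => PySem.Str.strip seg.headI == sec))

-- segments[-1].append(line)
def pvAppendLast (segs : List (List String)) (line : String) : List (List String) :=
  match segs with
  | [] => [[line]]
  | [s] => [s ++ [line]]
  | s :: r :: t => s :: pvAppendLast (r :: t) line

-- one iteration of B's first loop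
def pvStepB (segs : List (List String)) (line : String) : List (List String) :=
  if PySem.Str.startswith (PySem.Str.strip line) "[" then pvAppendLast (segs ++ [[]]) line
  else pvAppendLast segs line

def remove_sections_and_first_line_alt (content : List String) : List String :=
  let segs := (content.drop 1).foldl pvStepB [[]]
  segs.headI ++ ((segs.drop 1).filter pvKeepSeg).flatten

-- ===== PRECONDITION & SPEC =====
def Spec_remove_sections_and_first_line (content : List String) (out : List String) : Prop := out = remove_sections_and_first_line_alt content
instance (content : List String) (out : List String) : Decidable (Spec_remove_sections_and_first_line content out) := by unfold Spec_remove_sections_and_first_line; infer_instance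

-- ===== CLAIM (what is proved, stated in full; the proofs are below) =====
def Claim_equal_remove_sections_and_first_line : Prop := ∀ (content : List String), Dom_remove_sections_and_first_line content → Spec_remove_sections_and_first_line content (remove_sections_and_first_line content)

-- ===== LEMMAS AND PROOFS =====

-- A's skip flag as a function of the built segments: true iff the current (last, headed)
-- segment has a removal header; false while still in the leading headerless segment.
def pvIsSkip (ss : List (List String)) : Bool :=
  match ss.getLast? with
  | none => false
  | some seg => pvSectionsToRemove.any (fun sec => PySem.Str.strip seg.headI == sec)

theorem pvIsSkip_cons (s : List String) (xs : List (List String)) (h : xs ≠ []) :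
    pvIsSkip (s :: xs) = pvIsSkip xs := by
  cases xs with
  | nil => simp at h
  | cons a t => simp [pvIsSkip, List.getLast?_cons_cons]

theorem pvRemove_bracket (line : String)
    (h : pvSectionsToRemove.any (fun sec => PySem.Str.strip line == sec) = true) :
    PySem.Str.startswith (PySem.Str.strip line) "[" = true := by
  simp [pvSectionsToRemove] at h
  rcases h with h | h | h | h | h <;> rw [h] <;> decide

theorem pvAppendLast_pad (ss : List (List String)) (s0 : List String) (line : String) :
    pvAppendLast ((s0 :: ss) ++ [[]]) line = s0 :: (ss ++ [[line]]) := by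
  induction ss generalizing s0 with
  | nil => rfl
  | cons r t ih => simpa [pvAppendLast] using ih r

theorem pvAppendLast_spec (ss : List (List String)) (line : String)
    (hne : ss ≠ []) (hall : ∀ seg ∈ ss, seg ≠ []) :
    pvIsSkip (pvAppendLast ss line) = pvIsSkip ss ∧
    (∀ seg ∈ pvAppendLast ss line, seg ≠ []) ∧
    ((pvAppendLast ss line).filter pvKeepSeg).flatten =
      (ss.filter pvKeepSeg).flatten ++ (if pvIsSkip ss then [] else [line]) := by
  induction ss with
  | nil => simp at hne
  | cons s rest ih =>
    cases rest with
    | nil =>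
      have hs : s ≠ [] := hall s (by simp)
      have hhead : (s ++ [line]).headI = s.headI := by
        cases s with
        | nil => simp at hs
        | cons a t => simp
      have hAL : pvAppendLast [s] line = [s ++ [line]] := rfl
      have hk : pvKeepSeg (s ++ [line]) = pvKeepSeg s := by simp [pvKeepSeg, hhead]
      have hsk : pvIsSkip [s] = !pvKeepSeg s := by simp [pvIsSkip, pvKeepSeg]
      refine ⟨?_, ?_, ?_⟩
      · simp [hAL, pvIsSkip, hhead]
      · intro seg hseg; simp [hAL] at hseg; simp [hseg]
      · rw [hAL, hsk]
        cases h : pvKeepSeg s <;> simp [hk, h]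
    | cons r t =>
      have hne' : r :: t ≠ [] := by simp
      have hall' : ∀ seg ∈ r :: t, seg ≠ [] := fun seg hseg => hall seg (by simp [hseg])
      obtain ⟨ih1, ih2, ih3⟩ := ih hne' hall'
      have hAL : pvAppendLast (s :: r :: t) line = s :: pvAppendLast (r :: t) line := rfl
      have hALne : pvAppendLast (r :: t) line ≠ [] := by
        cases t <;> simp [pvAppendLast]
      refine ⟨?_, ?_, ?_⟩
      · rw [hAL, pvIsSkip_cons _ _ hALne, pvIsSkip_cons _ _ hne', ih1]
      · intro seg hseg
        rw [hAL] at hseg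
        rcases List.mem_cons.mp hseg with h | h
        · exact h ▸ hall s (by simp)
        · exact ih2 seg h
      · rw [hAL, pvIsSkip_cons _ _ hne']
        cases h : pvKeepSeg s <;> simp [List.filter_cons, h, ih3]

-- the loop invariant: A's fold over (skip, acc) tracks B's fold over the segments
theorem pvLoop (lines : List String) :
    ∀ (s0 : List String) (ss : List (List String)) (acc : List String) (skip : Bool),
    (∀ seg ∈ ss, seg ≠ []) →
    skip = pvIsSkip ss →
    acc = s0 ++ ((ss.filter pvKeepSeg).flatten) →
    (lines.foldl pvStepA (skip, acc)).2 =
      (let segs := lines.foldl pvStepB (s0 :: ss);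
       segs.headI ++ ((segs.drop 1).filter pvKeepSeg).flatten) := by
  induction lines with
  | nil => intro s0 ss acc skip _ _ hacc; simpa using hacc
  | cons line rest ih =>
    intro s0 ss acc skip hall hskip hacc
    simp only [List.foldl_cons]
    by_cases hbr : PySem.Str.startswith (PySem.Str.strip line) "[" = true
    · -- a header line: B starts a new segment [line]
      have hbr' : PySem.Chars.startswith (PySem.Chars.strip line.toList) ['['] = true := by
        simpa using hbr
      have hsegB : pvStepB (s0 :: ss) line = s0 :: (ss ++ [[line]]) := by
        unfold pvStepB; rw [if_pos hbr, pvAppendLast_pad]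
      have hskipNew : pvIsSkip (ss ++ [[line]]) =
          pvSectionsToRemove.any (fun sec => PySem.Str.strip line == sec) := by
        simp [pvIsSkip]
      rw [hsegB]
      by_cases hrem : pvSectionsToRemove.any (fun sec => PySem.Str.strip line == sec) = true
      · -- removal header: skip' = true, line dropped
        have hstep : pvStepA (skip, acc) line = (true, acc) := by
          simp [pvStepA, hrem]
        rw [hstep]
        exact ih s0 (ss ++ [[line]]) acc true
          (by intro seg hseg; rcases List.mem_append.mp hseg with h | h
              · exact hall seg h
              · simp at h; simp [h])
          (by rw [hskipNew, hrem])
          (by simp [List.filter_append, pvKeepSeg, hrem, hacc])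
      · -- other header: skip' = false, line kept
        have hstep : pvStepA (skip, acc) line = (false, acc ++ [line]) := by
          cases skip <;> simp [pvStepA, hrem, hbr']
        rw [hstep]
        exact ih s0 (ss ++ [[line]]) (acc ++ [line]) false
          (by intro seg hseg; rcases List.mem_append.mp hseg with h | h
              · exact hall seg h
              · simp at h; simp [h])
          (by rw [hskipNew]; simp [hrem])
          (by simp [List.filter_append, pvKeepSeg, hrem, hacc])
    · -- ordinary line: appended to the current segment
      have hbr' : PySem.Chars.startswith (PySem.Chars.strip line.toList) ['['] = false := by
        simpa using hbr
      have hrem : pvSectionsToRemove.any (fun sec => PySem.Str.strip line == sec) = false := by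
        cases h : pvSectionsToRemove.any (fun sec => PySem.Str.strip line == sec)
        · rfl
        · exact absurd (pvRemove_bracket line h) hbr
      have hsegB : pvStepB (s0 :: ss) line = pvAppendLast (s0 :: ss) line := by
        unfold pvStepB; rw [if_neg hbr]
      rw [hsegB]
      cases ss with
      | nil =>
        have hskip0 : skip = false := by simpa [pvIsSkip] using hskip
        have hstep : pvStepA (skip, acc) line = (false, acc ++ [line]) := by
          simp [pvStepA, hrem, hbr', hskip0]
        have hAL : pvAppendLast [s0] line = [s0 ++ [line]] := rfl
        rw [hstep, hAL]
        exact ih (s0 ++ [line]) [] (acc ++ [line]) false (by simp) (by simp [pvIsSkip])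
          (by simp at hacc; simp [hacc])
      | cons r t =>
        have hne' : r :: t ≠ [] := by simp
        obtain ⟨h1, h2, h3⟩ := pvAppendLast_spec (r :: t) line hne'
          (fun seg hseg => hall seg hseg)
        have hAL : pvAppendLast (s0 :: r :: t) line = s0 :: pvAppendLast (r :: t) line := rfl
        have hstep : pvStepA (skip, acc) line =
            (skip, if skip then acc else acc ++ [line]) := by
          cases skip <;> simp [pvStepA, hrem, hbr']
        rw [hstep, hAL]
        refine ih s0 (pvAppendLast (r :: t) line) _ skip h2 ?_ ?_
        · rw [h1, hskip]
        · rw [h3, hskip]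
          cases h : pvIsSkip (r :: t) <;> simp [hacc]
-- ===== VERDICT (by name: the statement is the Claim_ definition above) =====
theorem remove_sections_and_first_line_spec : Claim_equal_remove_sections_and_first_line := by
  intro content _
  show remove_sections_and_first_line content = remove_sections_and_first_line_alt content
  unfold remove_sections_and_first_line remove_sections_and_first_line_alt
  exact pvLoop (content.drop 1) [] [] [] false (by simp) (by simp [pvIsSkip]) (by simp)
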